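-- pv_equiv track=rewrite | github.com/c-ehrlich/cs50-scheduler | helpers.py | verify_slots
-- ===== SOURCE A (Python) =====
-- def verify_slots(slots):
--     """
--     (!) INPUT: takes a list of dictionaries in the exact format
--     [{'time_start': '10:00', 'time_end': '10:25'},...]
--     if the key names are wrong or the values are not times in this format,
--         the function will break. Sorry!!!
--     GOOD NEWS: the list does not need to be in order. We do that in here
--
--     OUTPUT: none
--     But it throws an error if any slots have end times that are equal to or earlier than their start times
--     Or if there is any overlap in time between any of the slots
--     """
--
--     # Sort slots by start time
--     slots = sorted(slots, key = lambda i: i['time_start'])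
--
--     # Make sure none of the slots end before they start or at the same time
--     for slot in slots:
--         if slot['time_start'] >= slot['time_end']:
--             return "Slots can't end before they start!"
--
--     # Make sure none of the slots overlap
--     for i in range(1, len(slots)):
--         if slots[i]['time_start'] < slots[i-1]['time_end']:
--             return "Slot times can't overlap!"
--
--     return ""
-- ===== SOURCE B (Python) =====
-- def verify_slots(slots):
--     # Validate every slot first (same precedence as the original's validity pass).
--     for slot in slots:
--         if slot['time_start'] >= slot['time_end']:
--             return "Slots can't end before they start!"
--
--     # No sorting: check every unordered pair for interval overlap directly.
--     n = len(slots)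
--     for i in range(n):
--         for j in range(i + 1, n):
--             if max(slots[i]['time_start'], slots[j]['time_start']) < \
--                min(slots[i]['time_end'], slots[j]['time_end']):
--                 return "Slot times can't overlap!"
--
--     return ""
-- ===== Notes on version B (the rewrite author's own statement) =====
-- stated objective: alternative
-- what changed: B drops the sort entirely: it validates slots in input order and detects overlap with a direct pairwise max(start)<min(end) test over all unordered pairs, instead of sorting by start time and comparing adjacent slots.
import Mathlib
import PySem

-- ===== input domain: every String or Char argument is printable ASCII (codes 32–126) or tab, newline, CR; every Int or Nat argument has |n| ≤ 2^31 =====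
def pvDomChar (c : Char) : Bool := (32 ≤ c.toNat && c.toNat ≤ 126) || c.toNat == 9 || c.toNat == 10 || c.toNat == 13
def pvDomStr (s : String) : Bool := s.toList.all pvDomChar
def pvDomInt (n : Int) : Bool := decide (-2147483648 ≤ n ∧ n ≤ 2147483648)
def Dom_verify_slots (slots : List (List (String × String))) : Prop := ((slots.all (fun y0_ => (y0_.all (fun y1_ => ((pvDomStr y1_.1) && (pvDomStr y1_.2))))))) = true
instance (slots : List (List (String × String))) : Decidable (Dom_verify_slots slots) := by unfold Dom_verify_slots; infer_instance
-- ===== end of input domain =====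

-- B replaces A's sort-then-adjacent overlap check by a sort-free pairwise
-- max(start) < min(end) test over all unordered pairs (alternative algorithm, same results).

-- slot['time_start'] / slot['time_end'] (KeyError excluded by Pre_)
def pvGetS (d : List (String × String)) (k : String) : String :=
  ((d.find? (fun p => p.1 == k)).map Prod.snd).getD ""

-- 'for slot in slots: if slot['time_start'] >= slot['time_end']: return …' — the loop both Pythons share verbatim
def pvInvalid : List (List (String × String)) → Bool
  | [] => false
  | d :: t => if pvGetS d "time_end" ≤ pvGetS d "time_start" then true else pvInvalid t

-- ===== PORT A =====
-- 'for i in range(1, len(slots)): if slots[i]['time_start'] < slots[i-1]['time_end'] …' as recursion on adjacent elements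
def pvAAdj : List (List (String × String)) → Bool
  | a :: b :: t => if pvGetS b "time_start" < pvGetS a "time_end" then true else pvAAdj (b :: t)
  | _ => false

def verify_slots (slots : List (List (String × String))) : String :=
  let s := PySem.List.sorted slots (fun d => pvGetS d "time_start") false
  if pvInvalid s then "Slots can't end before they start!"
  else if pvAAdj s then "Slot times can't overlap!"
  else ""

-- ===== PORT B =====
-- max(slots[i]['time_start'], slots[j]['time_start']) < min(slots[i]['time_end'], slots[j]['time_end'])
def pvOv (a b : List (String × String)) : Bool :=
  max (pvGetS a "time_start") (pvGetS b "time_start") < min (pvGetS a "time_end") (pvGetS b "time_end")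

-- the nested 'for i … for j in range(i+1, n)' loop: outer element against every later element
def pvBPairs : List (List (String × String)) → Bool
  | [] => false
  | a :: t => if t.any (fun b => pvOv a b) then true else pvBPairs t

def verify_slots_alt (slots : List (List (String × String))) : String :=
  if pvInvalid slots then "Slots can't end before they start!"
  else if pvBPairs slots then "Slot times can't overlap!"
  else ""

-- ===== PRECONDITION & SPEC =====
-- Pre_ excludes exactly the inputs where Python A raises KeyError: a slot missing the
-- 'time_start' or 'time_end' key (B raises there too).
def Pre_verify_slots (slots : List (List (String × String))) : Prop :=
  ∀ d ∈ slots, (d.find? (fun p => p.1 == "time_start")).isSome = true ∧ (d.find? (fun p => p.1 == "time_end")).isSome = true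
instance (slots : List (List (String × String))) : Decidable (Pre_verify_slots slots) := by unfold Pre_verify_slots; infer_instance

def pvWitness_verify_slots : (List (List (String × String))) :=
  [[("time_start", "09:00"), ("time_end", "10:00")], [("time_start", "10:00"), ("time_end", "10:30")]]

def Spec_verify_slots (slots : List (List (String × String))) (out : String) : Prop := out = verify_slots_alt slots
instance (slots : List (List (String × String))) (out : String) : Decidable (Spec_verify_slots slots out) := by unfold Spec_verify_slots; infer_instance

-- ===== CLAIM (what is proved, stated in full; the proofs are below) =====
def Claim_equal_verify_slots : Prop := ∀ (slots : List (List (String × String))), Dom_verify_slots slots → Pre_verify_slots slots → Spec_verify_slots slots (verify_slots slots)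

-- ===== LEMMAS AND PROOFS =====

theorem pvInvalid_iff (l : List (List (String × String))) :
    pvInvalid l = true ↔ ∃ d ∈ l, pvGetS d "time_end" ≤ pvGetS d "time_start" := by
  induction l with
  | nil => simp [pvInvalid]
  | cons a t ih =>
    by_cases h : pvGetS a "time_end" ≤ pvGetS a "time_start"
    · rw [pvInvalid, if_pos h]
      exact ⟨fun _ => ⟨a, List.mem_cons_self, h⟩, fun _ => rfl⟩
    · rw [pvInvalid, if_neg h]
      constructor
      · intro ht
        rcases ih.mp ht with ⟨d, hd, hled⟩
        exact ⟨d, List.mem_cons_of_mem a hd, hled⟩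
      · intro hex
        rcases hex with ⟨d, hd, hled⟩
        cases hd with
        | head => exact absurd hled h
        | tail _ hd => exact ih.mpr ⟨d, hd, hled⟩

theorem pvInvalid_perm {l l' : List (List (String × String))} (h : l.Perm l') :
    pvInvalid l = pvInvalid l' := by
  by_cases hl : pvInvalid l = true
  · rw [hl]
    rcases (pvInvalid_iff l).mp hl with ⟨d, hd, hle⟩
    exact ((pvInvalid_iff l').mpr ⟨d, h.mem_iff.mp hd, hle⟩).symm
  · have hl' : ¬ pvInvalid l' = true := by
      intro hc
      rcases (pvInvalid_iff l').mp hc with ⟨d, hd, hle⟩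
      exact hl ((pvInvalid_iff l).mpr ⟨d, h.mem_iff.mpr hd, hle⟩)
    simp only [Bool.not_eq_true] at hl hl'
    rw [hl, hl']

theorem pvOv_comm (a b : List (String × String)) : pvOv a b = pvOv b a := by
  simp only [pvOv, max_comm, min_comm]

theorem pvBPairs_iff (l : List (List (String × String))) :
    pvBPairs l = true ↔ ¬ l.Pairwise (fun a b => pvOv a b = false) := by
  induction l with
  | nil => simp [pvBPairs]
  | cons a t ih =>
    by_cases h : t.any (fun b => pvOv a b) = true
    · rw [pvBPairs, if_pos h]
      rcases List.any_eq_true.mp h with ⟨b, hb, hov⟩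
      refine ⟨fun _ hc => ?_, fun _ => rfl⟩
      exact absurd ((List.pairwise_cons.mp hc).1 b hb) (by simp [hov])
    · have h' : ∀ b ∈ t, pvOv a b = false := by
        intro b hb
        by_contra hc
        exact h (List.any_eq_true.mpr ⟨b, hb, by simpa [Bool.not_eq_false] using hc⟩)
      rw [pvBPairs, if_neg h]
      rw [ih, List.pairwise_cons]
      constructor
      · intro hnp hc; exact hnp hc.2
      · intro hnp hc; exact hnp ⟨h', hc⟩

theorem pvBPairs_perm {l l' : List (List (String × String))} (h : l.Perm l') :
    pvBPairs l = pvBPairs l' := by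
  have hp := h.pairwise_iff (fun {x y} (hxy : pvOv x y = false) => by rw [pvOv_comm]; exact hxy)
  by_cases hl : pvBPairs l = true
  · rw [hl, Eq.comm, pvBPairs_iff]
    exact fun hc => (pvBPairs_iff l).mp hl (hp.mpr hc)
  · have hl' : ¬ pvBPairs l' = true := fun hc =>
      hl ((pvBPairs_iff l).mpr (fun hpl => (pvBPairs_iff l').mp hc (hp.mp hpl)))
    simp only [Bool.not_eq_true] at hl hl'
    rw [hl, hl']

-- On a start-sorted list of valid slots, adjacent non-overlap implies pairwise non-overlap.
theorem pvAdj_eq_pairs :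
    ∀ (l : List (List (String × String))),
    l.Pairwise (fun a b => pvGetS a "time_start" ≤ pvGetS b "time_start") →
    (∀ d ∈ l, pvGetS d "time_start" < pvGetS d "time_end") →
    pvAAdj l = pvBPairs l
  | [], _, _ => rfl
  | [a], _, _ => rfl
  | a :: b :: t, hs, hv => by
    have hs' : (b :: t).Pairwise (fun a b => pvGetS a "time_start" ≤ pvGetS b "time_start") :=
      hs.tail
    have hab : pvGetS a "time_start" ≤ pvGetS b "time_start" :=
      (List.pairwise_cons.mp hs).1 b List.mem_cons_self
    have ih := pvAdj_eq_pairs (b :: t) hs' (fun d hd => hv d (List.mem_cons_of_mem a hd))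
    by_cases h : pvGetS b "time_start" < pvGetS a "time_end"
    · -- adjacent overlap: the pair (a, b) overlaps too
      have hov : pvOv a b = true := by
        rw [pvOv]
        refine decide_eq_true ?_
        rw [max_eq_right hab]
        exact lt_min h (hv b (List.mem_cons_of_mem a List.mem_cons_self))
      have hany : (b :: t).any (fun c => pvOv a c) = true :=
        List.any_eq_true.mpr ⟨b, List.mem_cons_self, hov⟩
      rw [pvAAdj, if_pos h, pvBPairs, if_pos hany]
    · -- en a ≤ st b ≤ st c for every later c, so a overlaps nothing later
      have hea : pvGetS a "time_end" ≤ pvGetS b "time_start" := le_of_not_gt h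
      have hany : (b :: t).any (fun c => pvOv a c) = false := by
        rw [List.any_eq_false]
        intro c hc
        have hbc : pvGetS b "time_start" ≤ pvGetS c "time_start" := by
          cases hc with
          | head => exact le_refl _
          | tail _ hc => exact (List.pairwise_cons.mp hs').1 c hc
        rw [pvOv]
        intro hcon
        exact absurd (of_decide_eq_true hcon) (not_lt.mpr (le_trans (min_le_left _ _)
          (le_trans hea (le_trans hbc (le_max_right _ _)))))
      rw [pvAAdj, if_neg h, pvBPairs, if_neg (ne_true_of_eq_false hany), ih]

-- ===== VERDICT (by name: the statement is the Claim_ definition above) =====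
theorem verify_slots_spec : Claim_equal_verify_slots := by
  intro slots _ _
  show verify_slots slots = verify_slots_alt slots
  show (if pvInvalid (PySem.List.sorted slots (fun d => pvGetS d "time_start") false) then
          "Slots can't end before they start!"
        else if pvAAdj (PySem.List.sorted slots (fun d => pvGetS d "time_start") false) then
          "Slot times can't overlap!" else "") = verify_slots_alt slots
  rw [verify_slots_alt]
  have hperm : (PySem.List.sorted slots (fun d => pvGetS d "time_start") false).Perm slots :=
    PySem.List.sorted_perm slots _ false
  rw [pvInvalid_perm hperm]
  by_cases hinv : pvInvalid slots = true
  · rw [if_pos hinv, if_pos hinv]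
  · have hv : ∀ d ∈ PySem.List.sorted slots (fun d => pvGetS d "time_start") false,
        pvGetS d "time_start" < pvGetS d "time_end" := by
      intro d hd
      by_contra hc
      exact hinv ((pvInvalid_iff slots).mpr ⟨d, hperm.mem_iff.mp hd, not_lt.mp hc⟩)
    have hs := PySem.List.sorted_pairwise (xs := slots) (key := fun d => pvGetS d "time_start")
    rw [if_neg hinv, if_neg hinv, pvAdj_eq_pairs _ hs hv, pvBPairs_perm hperm]
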